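-- pv_equiv track=rewrite | github.com/nashidahmed/battlesnake | main.py | num_surrounding_free
-- ===== SOURCE A (Python) =====
-- def num_surrounding_free(p1, snakes, width, height):
--   x_min = p1['x'] - 1
--   x_max = p1['x'] + 1
--   y_min = p1['y'] - 1
--   y_max = p1['y'] + 1
--   if x_min < 0: x_min = 0
--   if x_min > width: x_max = width
--   if y_min < 0: y_min = 0
--   if y_min > height: y_max = height
--   count = 0
--   surrounding = []
--   for x in range(x_min, x_max + 1):
--     for y in range(y_min, y_max + 1):
--       surrounding.append({'x': x, 'y': y})
--   for snake in snakes: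
--     for part in snake['body']:
--       if part not in surrounding:
--         count = count + 1
--   return count
-- ===== SOURCE B (Python) =====
-- def num_surrounding_free(p1, snakes, width, height):
--     x_min = max(p1['x'] - 1, 0)
--     x_max = width if x_min > width else p1['x'] + 1
--     y_min = max(p1['y'] - 1, 0)
--     y_max = height if y_min > height else p1['y'] + 1
--     xs = range(x_min, x_max + 1)
--     ys = range(y_min, y_max + 1)
--     return sum(1 for snake in snakes for part in snake['body']
--                if part.get('x') not in xs or part.get('y') not in ys)
-- ===== Notes on version B (the rewrite author's own statement) =====
-- stated objective: simpler
-- what changed: B drops A's construction of the up-to-9-element 'surrounding' dict list and the per-part linear membership scan, counting each body part directly by range membership of its coordinates in the clipped box.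
-- intended difference: On inputs where some body part carries extra keys besides 'x' and 'y' while its coordinates lie inside the clipped box, A counts it as outside (its dict equality against the plain {'x','y'} grid dicts never matches), B counts it as inside; a box-membership count should depend only on the coordinates, so B's value is the intended one. — e.g. on num_surrounding_free([("x", 2), ("y", 2)], [[("body", [[("x", 2), ("y", 2), ("z", 0)]])]], 10, 10): A returns 1, B returns 0
import Mathlib
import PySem

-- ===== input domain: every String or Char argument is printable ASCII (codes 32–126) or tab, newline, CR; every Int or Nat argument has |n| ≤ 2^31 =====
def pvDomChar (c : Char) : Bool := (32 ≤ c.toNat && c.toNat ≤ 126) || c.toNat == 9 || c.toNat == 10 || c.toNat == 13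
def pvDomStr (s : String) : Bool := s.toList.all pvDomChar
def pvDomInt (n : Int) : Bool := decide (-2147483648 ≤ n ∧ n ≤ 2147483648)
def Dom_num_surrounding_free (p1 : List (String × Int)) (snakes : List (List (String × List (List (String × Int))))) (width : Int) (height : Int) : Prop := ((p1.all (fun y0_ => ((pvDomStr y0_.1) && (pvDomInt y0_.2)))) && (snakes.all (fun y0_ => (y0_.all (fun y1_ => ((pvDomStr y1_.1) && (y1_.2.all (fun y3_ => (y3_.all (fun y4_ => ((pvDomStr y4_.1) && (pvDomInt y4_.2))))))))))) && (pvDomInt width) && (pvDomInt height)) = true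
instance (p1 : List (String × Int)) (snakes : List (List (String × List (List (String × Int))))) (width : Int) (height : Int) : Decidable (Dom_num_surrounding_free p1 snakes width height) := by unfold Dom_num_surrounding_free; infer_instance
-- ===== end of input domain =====

-- B replaces A's 3x3 surrounding-list construction and per-part membership scan with a direct
-- range-membership test of each part's coordinates (objective: simpler; return value only, no mutation).

-- ===== PORT A =====
-- Python '==' on dicts (both sides with Nodup keys): same size and every item looked up in the other
def pyDictEq (d1 d2 : PySem.Dict String Int) : Bool :=
  d1.size == d2.size && d1.items.all (fun kv => d2.get? kv.1 == some kv.2)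

-- the 'surrounding' list built by A's two nested append loops
def pvSurrounding (x_min x_max y_min y_max : Int) : List (PySem.Dict String Int) :=
  (PySem.List.pyRange x_min (x_max + 1) 1).foldl
    (fun acc x =>
      (PySem.List.pyRange y_min (y_max + 1) 1).foldl
        (fun acc y => acc ++ [PySem.Dict.mk [("x", x), ("y", y)]]) acc) []

def num_surrounding_free (p1 : List (String × Int)) (snakes : List (List (String × List (List (String × Int))))) (width : Int) (height : Int) : Int :=
  let d := PySem.Dict.ofList p1
  let x_min := d.getD "x" 0 - 1
  let x_max := d.getD "x" 0 + 1
  let y_min := d.getD "y" 0 - 1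
  let y_max := d.getD "y" 0 + 1
  let x_min := if x_min < 0 then 0 else x_min
  let x_max := if x_min > width then width else x_max
  let y_min := if y_min < 0 then 0 else y_min
  let y_max := if y_min > height then height else y_max
  let surrounding := pvSurrounding x_min x_max y_min y_max
  snakes.foldl
    (fun count snake =>
      ((PySem.Dict.ofList snake).getD "body" []).foldl
        (fun count part =>
          if surrounding.any (fun s => pyDictEq (PySem.Dict.ofList part) s) then count
          else count + 1) count) 0

-- ===== PORT B =====
-- 'v in range(lo, hi)' for v = part.get(k), an int or None: None is in no range; an int is a
-- member iff lo ≤ v < hi (step 1). Exact for these operands.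
def pvInRange (v : Option Int) (lo hi : Int) : Bool :=
  match v with
  | none => false
  | some v => decide (lo ≤ v) && decide (v < hi)

def num_surrounding_free_alt (p1 : List (String × Int)) (snakes : List (List (String × List (List (String × Int))))) (width : Int) (height : Int) : Int :=
  let d := PySem.Dict.ofList p1
  let x_min := max (d.getD "x" 0 - 1) 0
  let x_max := if x_min > width then width else d.getD "x" 0 + 1
  let y_min := max (d.getD "y" 0 - 1) 0
  let y_max := if y_min > height then height else d.getD "y" 0 + 1
  (((snakes.flatMap (fun snake => (PySem.Dict.ofList snake).getD "body" [])).filter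
      (fun part =>
        !pvInRange ((PySem.Dict.ofList part).get? "x") x_min (x_max + 1) ||
        !pvInRange ((PySem.Dict.ofList part).get? "y") y_min (y_max + 1))).length : Int)

-- ===== PRECONDITION & SPEC =====
-- Pre_ excludes exactly the inputs where the Python raises KeyError: p1 without an 'x' or 'y' key,
-- or a snake without a 'body' key.
def Pre_num_surrounding_free (p1 : List (String × Int)) (snakes : List (List (String × List (List (String × Int))))) (width : Int) (height : Int) : Prop :=
  ((PySem.Dict.ofList p1).contains "x" && (PySem.Dict.ofList p1).contains "y" &&
    snakes.all (fun snake => (PySem.Dict.ofList snake).contains "body")) = true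
instance (p1 : List (String × Int)) (snakes : List (List (String × List (List (String × Int))))) (width : Int) (height : Int) : Decidable (Pre_num_surrounding_free p1 snakes width height) := by unfold Pre_num_surrounding_free; infer_instance

def pvWitness_num_surrounding_free : (List (String × Int)) × (List (List (String × List (List (String × Int))))) × Int × Int :=
  ([("x", 2), ("y", 3)], [[("body", [[("x", 2), ("y", 2)], [("x", 9), ("y", 9)]])]], 10, 10)

-- On inputs where some body part carries extra keys besides 'x' and 'y' while its coordinates lie
-- inside the clipped box, A counts it as outside (its dict equality against the plain {'x','y'}
-- grid dicts never matches), B counts it as inside; a box-membership count should depend only on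
-- the coordinates, so B's value is the intended one.

-- input accessors for stating D_: a dict entry's value, and 'coordinate c lies in the 3-wide band
-- around p clipped to the board' (an empty band when the whole band lies beyond the board)
def pvAt (d : List (String × Int)) (k : String) : Int := PySem.Dict.getD (PySem.Dict.ofList d) k 0
def pvInBand (p c bound : Int) : Prop := c ≤ p + 1 ∧ max (p - 1) 0 ≤ min c bound

def D_num_surrounding_free (p1 : List (String × Int)) (snakes : List (List (String × List (List (String × Int))))) (width : Int) (height : Int) : Prop :=
  ∃ snake ∈ snakes, ∃ part ∈ PySem.Dict.getD (PySem.Dict.ofList snake) "body" [],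
    "x" ∈ part.map Prod.fst ∧ "y" ∈ part.map Prod.fst ∧
    PySem.Dict.size (PySem.Dict.ofList part) ≠ 2 ∧
    pvInBand (pvAt p1 "x") (pvAt part "x") width ∧ pvInBand (pvAt p1 "y") (pvAt part "y") height
instance (p1 : List (String × Int)) (snakes : List (List (String × List (List (String × Int))))) (width : Int) (height : Int) : Decidable (D_num_surrounding_free p1 snakes width height) := by unfold D_num_surrounding_free pvInBand; infer_instance

def Spec_num_surrounding_free (p1 : List (String × Int)) (snakes : List (List (String × List (List (String × Int))))) (width : Int) (height : Int) (out : Int) : Prop := ¬ D_num_surrounding_free p1 snakes width height → out = num_surrounding_free_alt p1 snakes width height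
instance (p1 : List (String × Int)) (snakes : List (List (String × List (List (String × Int))))) (width : Int) (height : Int) (out : Int) : Decidable (Spec_num_surrounding_free p1 snakes width height out) := by unfold Spec_num_surrounding_free; infer_instance

def pvDiffWitness_num_surrounding_free : (List (String × Int)) × (List (List (String × List (List (String × Int))))) × Int × Int :=
  ([("x", 2), ("y", 2)], [[("body", [[("x", 2), ("y", 2), ("z", 0)]])]], 10, 10)
def pvDiffWitnessOut_num_surrounding_free : Int × Int := (1, 0)

-- ===== CLAIM (what is proved, stated in full; the proofs are below) =====
def Claim_unchanged_num_surrounding_free : Prop := ∀ (p1 : List (String × Int)) (snakes : List (List (String × List (List (String × Int))))) (width : Int) (height : Int), Dom_num_surrounding_free p1 snakes width height → Pre_num_surrounding_free p1 snakes width height → Spec_num_surrounding_free p1 snakes width height (num_surrounding_free p1 snakes width height)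
def Claim_changed_num_surrounding_free : Prop := Dom_num_surrounding_free (pvDiffWitness_num_surrounding_free.1) (pvDiffWitness_num_surrounding_free.2.1) (pvDiffWitness_num_surrounding_free.2.2.1) (pvDiffWitness_num_surrounding_free.2.2.2) ∧ Pre_num_surrounding_free (pvDiffWitness_num_surrounding_free.1) (pvDiffWitness_num_surrounding_free.2.1) (pvDiffWitness_num_surrounding_free.2.2.1) (pvDiffWitness_num_surrounding_free.2.2.2) ∧ D_num_surrounding_free (pvDiffWitness_num_surrounding_free.1) (pvDiffWitness_num_surrounding_free.2.1) (pvDiffWitness_num_surrounding_free.2.2.1) (pvDiffWitness_num_surrounding_free.2.2.2) ∧ num_surrounding_free (pvDiffWitness_num_surrounding_free.1) (pvDiffWitness_num_surrounding_free.2.1) (pvDiffWitness_num_surrounding_free.2.2.1) (pvDiffWitness_num_surrounding_free.2.2.2) = pvDiffWitnessOut_num_surrounding_free.1 ∧ num_surrounding_free_alt (pvDiffWitness_num_surrounding_free.1) (pvDiffWitness_num_surrounding_free.2.1) (pvDiffWitness_num_surrounding_free.2.2.1) (pvDiffWitness_num_surrounding_free.2.2.2) = pvDiffWitnessOut_num_surrounding_free.2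 ∧ pvDiffWitnessOut_num_surrounding_free.1 ≠ pvDiffWitnessOut_num_surrounding_free.2
def Claim_exact_num_surrounding_free : Prop := ∀ (p1 : List (String × Int)) (snakes : List (List (String × List (List (String × Int))))) (width : Int) (height : Int), Dom_num_surrounding_free p1 snakes width height → Pre_num_surrounding_free p1 snakes width height → D_num_surrounding_free p1 snakes width height → num_surrounding_free p1 snakes width height ≠ num_surrounding_free_alt p1 snakes width height

-- ===== LEMMAS AND PROOFS =====

theorem pvWitness_ok : Dom_num_surrounding_free (pvWitness_num_surrounding_free.1) (pvWitness_num_surrounding_free.2.1) (pvWitness_num_surrounding_free.2.2.1) (pvWitness_num_surrounding_free.2.2.2) ∧ Pre_num_surrounding_free (pvWitness_num_surrounding_free.1) (pvWitness_num_surrounding_free.2.1) (pvWitness_num_surrounding_free.2.2.1) (pvWitness_num_surrounding_free.2.2.2) := by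
  constructor <;> decide

-- a Nodup list of length 2 containing "x" and "y" contains nothing else
theorem two_keys (l : List String) (hnd : l.Nodup) (hl : l.length = 2)
    (hx : "x" ∈ l) (hy : "y" ∈ l) : ∀ k ∈ l, k = "x" ∨ k = "y" := by
  match l, hl with
  | [a, b], _ =>
    have hab : a ≠ b := by simpa using hnd
    simp only [List.mem_cons, List.not_mem_nil, or_false] at hx hy
    intro k hk
    simp only [List.mem_cons, List.not_mem_nil, or_false] at hk
    rcases hx with hx | hx <;> rcases hy with hy | hy
    · exact absurd (hx.trans hy.symm) (by decide)
    · rcases hk with rfl | rfl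
      · exact Or.inl hx.symm
      · exact Or.inr hy.symm
    · rcases hk with rfl | rfl
      · exact Or.inr hy.symm
      · exact Or.inl hx.symm
    · exact absurd (hx.trans hy.symm) (by decide)

-- a Nodup list of length 2 all of whose members are "x" or "y" contains both
theorem keys_xy (l : List String) (hnd : l.Nodup) (hl : l.length = 2)
    (hsub : ∀ k ∈ l, k = "x" ∨ k = "y") : "x" ∈ l ∧ "y" ∈ l := by
  match l, hl with
  | [a, b], _ =>
    have hab : a ≠ b := by simpa using hnd
    have ha := hsub a (by simp)
    have hb := hsub b (by simp)
    rcases ha with rfl | rfl <;> rcases hb with rfl | rfl <;> simp_all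

-- characterisation of Python 'part == {'x': x, 'y': y}'
theorem pyDictEq_grid (pd : PySem.Dict String Int) (hnd : pd.keys.Nodup) (x y : Int) :
    pyDictEq pd (PySem.Dict.mk [("x", x), ("y", y)]) = true ↔
      (pd.size = 2 ∧ pd.get? "x" = some x ∧ pd.get? "y" = some y) := by
  have hxy : ("x" : String) ≠ "y" := by decide
  have hget : ∀ (k : String) (v : Int), (PySem.Dict.mk [("x", x), ("y", y)]).get? k = some v ↔
      ((k = "x" ∧ v = x) ∨ (k = "y" ∧ v = y)) := by
    intro k v
    simp only [PySem.Dict.get?_mk_cons]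
    by_cases hkx : k = "x"
    · subst hkx
      simp [eq_comm]
    · by_cases hky : k = "y"
      · subst hky
        have h1 : (("x" : String) == "y") = false := by decide
        simp [h1, eq_comm]
      · have h1 : (("x" : String) == k) = false := by
          simp only [beq_eq_false_iff_ne, ne_eq]; exact fun h => hkx h.symm
        have h2 : (("y" : String) == k) = false := by
          simp only [beq_eq_false_iff_ne, ne_eq]; exact fun h => hky h.symm
        simp [h1, h2, PySem.Dict.get?]
        tauto
  have hkeylen : pd.keys.length = pd.items.length := by
    show (pd.items.map (·.1)).length = pd.items.length
    simp
  constructor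
  · intro h
    simp only [pyDictEq, Bool.and_eq_true, beq_iff_eq, List.all_eq_true] at h
    obtain ⟨hsz, hall⟩ := h
    have hsz2 : pd.size = 2 := hsz
    have hitems : ∀ kv ∈ pd.items, (kv.1 = "x" ∧ kv.2 = x) ∨ (kv.1 = "y" ∧ kv.2 = y) := by
      intro kv hkv
      exact (hget kv.1 kv.2).mp (hall kv hkv)
    have hkeys : ∀ k ∈ pd.keys, k = "x" ∨ k = "y" := by
      intro k hk
      obtain ⟨kv, hkv, rfl⟩ := List.mem_map.mp hk
      exact (hitems kv hkv).imp And.left And.left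
    obtain ⟨hxk, hyk⟩ := keys_xy pd.keys hnd (by rw [hkeylen]; exact hsz2) hkeys
    have hgv : ∀ k : String, k ∈ pd.keys → ∃ v, pd.get? k = some v := by
      intro k hk
      have hc : pd.contains k = true := by
        rw [PySem.Dict.contains_eq_decide_mem_keys]
        exact decide_eq_true hk
      rw [PySem.Dict.contains_eq_isSome_get?] at hc
      exact Option.isSome_iff_exists.mp hc
    obtain ⟨vx, hvx⟩ := hgv "x" hxk
    obtain ⟨vy, hvy⟩ := hgv "y" hyk
    have hmx := hitems _ (PySem.Dict.mem_items_of_get?_eq_some _ hvx)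
    have hmy := hitems _ (PySem.Dict.mem_items_of_get?_eq_some _ hvy)
    simp only at hmx hmy
    refine ⟨hsz2, ?_, ?_⟩
    · rcases hmx with ⟨_, hv⟩ | ⟨hk, _⟩
      · rw [hvx, hv]
      · exact absurd hk hxy
    · rcases hmy with ⟨hk, _⟩ | ⟨_, hv⟩
      · exact absurd hk hxy.symm
      · rw [hvy, hv]
  · rintro ⟨hsz, hx, hy⟩
    have hxm : ("x", x) ∈ pd.items := PySem.Dict.mem_items_of_get?_eq_some _ hx
    have hym : ("y", y) ∈ pd.items := PySem.Dict.mem_items_of_get?_eq_some _ hy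
    have hkx : "x" ∈ pd.keys := PySem.Dict.mem_keys_of_mem_items _ hxm
    have hky : "y" ∈ pd.keys := PySem.Dict.mem_keys_of_mem_items _ hym
    have hklen : pd.keys.length = 2 := by rw [hkeylen]; exact hsz
    simp only [pyDictEq, Bool.and_eq_true, beq_iff_eq, List.all_eq_true]
    refine ⟨hsz, ?_⟩
    intro kv hkv
    have hk : kv.1 ∈ pd.keys := List.mem_map.mpr ⟨kv, hkv, rfl⟩
    have hv : pd.get? kv.1 = some kv.2 := by
      have : (kv.1, kv.2) ∈ pd.items := by simpa using hkv
      exact PySem.Dict.get?_of_mem_items _ this hnd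
    rw [hget]
    rcases two_keys pd.keys hnd hklen hkx hky kv.1 hk with h | h
    · left
      refine ⟨h, ?_⟩
      rw [h] at hv
      rw [hv] at hx
      exact Option.some_inj.mp hx
    · right
      refine ⟨h, ?_⟩
      rw [h] at hv
      rw [hv] at hy
      exact Option.some_inj.mp hy

-- the surrounding list as a flatMap
theorem pvSurrounding_eq (x_min x_max y_min y_max : Int) :
    pvSurrounding x_min x_max y_min y_max =
      (PySem.List.pyRange x_min (x_max + 1) 1).flatMap
        (fun x => (PySem.List.pyRange y_min (y_max + 1) 1).map
          (fun y => PySem.Dict.mk [("x", x), ("y", y)])) := by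
  unfold pvSurrounding
  simp only [PySem.List.foldl_append_singleton_eq_map, PySem.List.foldl_append_eq_flatMap,
    List.nil_append]

-- A's membership of a part in the grid = (exactly two keys AND both coordinates in range)
theorem any_eq (xm xM ym yM : Int) (part : List (String × Int)) :
    ((pvSurrounding xm xM ym yM).any
        (fun s => pyDictEq (PySem.Dict.ofList part) s)) =
      (((PySem.Dict.ofList part).size == 2) &&
        (pvInRange ((PySem.Dict.ofList part).get? "x") xm (xM + 1) &&
         pvInRange ((PySem.Dict.ofList part).get? "y") ym (yM + 1))) := by
  have hnd : (PySem.Dict.ofList part).keys.Nodup := PySem.Dict.nodup_keys_ofList part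
  rw [pvSurrounding_eq, Bool.eq_iff_iff]
  simp only [List.any_eq_true, List.mem_flatMap, List.mem_map, PySem.List.mem_pyRange_one,
    Bool.and_eq_true, beq_iff_eq]
  constructor
  · rintro ⟨s, ⟨x, ⟨hx1, hx2⟩, y, ⟨⟨hy1, hy2⟩, rfl⟩⟩, hEq⟩
    obtain ⟨hsz, hgx, hgy⟩ := (pyDictEq_grid _ hnd x y).mp hEq
    refine ⟨hsz, ?_, ?_⟩
    · rw [hgx]
      simp only [pvInRange, Bool.and_eq_true, decide_eq_true_eq]
      exact ⟨hx1, hx2⟩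
    · rw [hgy]
      simp only [pvInRange, Bool.and_eq_true, decide_eq_true_eq]
      exact ⟨hy1, hy2⟩
  · rintro ⟨hsz, hrx, hry⟩
    cases hgx : (PySem.Dict.ofList part).get? "x" with
    | none => rw [hgx] at hrx; exact absurd hrx (by simp [pvInRange])
    | some vx =>
      cases hgy : (PySem.Dict.ofList part).get? "y" with
      | none => rw [hgy] at hry; exact absurd hry (by simp [pvInRange])
      | some vy =>
        rw [hgx] at hrx
        rw [hgy] at hry
        simp only [pvInRange, Bool.and_eq_true, decide_eq_true_eq] at hrx hry
        exact ⟨PySem.Dict.mk [("x", vx), ("y", vy)],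
          ⟨vx, ⟨hrx.1, hrx.2⟩, vy, ⟨⟨hry.1, hry.2⟩, rfl⟩⟩,
          (pyDictEq_grid _ hnd vx vy).mpr ⟨hsz, hgx, hgy⟩⟩

-- a key occurs in the dict of an association list iff it occurs in the list
theorem mem_keys_ofList (l : List (String × Int)) (k : String) :
    k ∈ (PySem.Dict.ofList l).keys ↔ k ∈ l.map Prod.fst := by
  rw [PySem.Dict.ofList, PySem.Dict.update]
  rw [show (fun (d : PySem.Dict String Int) (kv : String × Int) => d.insert kv.1 kv.2) =
      (fun d kv => d.insert (Prod.fst kv)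
        ((fun (_ : PySem.Dict String Int) (kv : String × Int) => kv.2) d kv)) from rfl]
  rw [PySem.Dict.keys_foldl_insert_key, PySem.Dict.keys_empty, PySem.Set.update_nil_left]
  exact PySem.Set.mem_ofList (xs := l.map Prod.fst) (y := k)

theorem contains_ofList_iff (l : List (String × Int)) (k : String) :
    (PySem.Dict.ofList l).contains k = true ↔ k ∈ l.map Prod.fst := by
  rw [PySem.Dict.contains_eq_decide_mem_keys, decide_eq_true_iff]
  exact mem_keys_ofList l k

-- D_ restated in the shape the loop proofs use
theorem D_iff (p1 : List (String × Int)) (snakes : List (List (String × List (List (String × Int))))) (width height : Int) :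
    D_num_surrounding_free p1 snakes width height ↔
      ∃ part ∈ snakes.flatMap (fun snake => (PySem.Dict.ofList snake).getD "body" []),
        (PySem.Dict.ofList part).size ≠ 2 ∧
        pvInRange ((PySem.Dict.ofList part).get? "x")
          (max ((PySem.Dict.ofList p1).getD "x" 0 - 1) 0)
          ((if max ((PySem.Dict.ofList p1).getD "x" 0 - 1) 0 > width then width
            else (PySem.Dict.ofList p1).getD "x" 0 + 1) + 1) = true ∧
        pvInRange ((PySem.Dict.ofList part).get? "y")
          (max ((PySem.Dict.ofList p1).getD "y" 0 - 1) 0)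
          ((if max ((PySem.Dict.ofList p1).getD "y" 0 - 1) 0 > height then height
            else (PySem.Dict.ofList p1).getD "y" 0 + 1) + 1) = true := by
  unfold D_num_surrounding_free pvAt pvInBand
  constructor
  · rintro ⟨snake, hs, part, hp, hmx, hmy, hsz, ⟨h4, h5⟩, ⟨h9, h10⟩⟩
    have hcx := (contains_ofList_iff part "x").mpr hmx
    have hcy := (contains_ofList_iff part "y").mpr hmy
    rw [PySem.Dict.contains_eq_isSome_get?] at hcx hcy
    obtain ⟨vx, hvx⟩ := Option.isSome_iff_exists.mp hcx
    obtain ⟨vy, hvy⟩ := Option.isSome_iff_exists.mp hcy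
    have hdx : (PySem.Dict.ofList part).getD "x" 0 = vx := PySem.Dict.getD_of_get?_eq_some _ 0 hvx
    have hdy : (PySem.Dict.ofList part).getD "y" 0 = vy := PySem.Dict.getD_of_get?_eq_some _ 0 hvy
    rw [hdx] at h4 h5
    rw [hdy] at h9 h10
    refine ⟨part, List.mem_flatMap.mpr ⟨snake, hs, hp⟩, hsz, ?_, ?_⟩
    · rw [hvx, if_neg (by omega)]
      simp only [pvInRange, Bool.and_eq_true, decide_eq_true_eq]
      omega
    · rw [hvy, if_neg (by omega)]
      simp only [pvInRange, Bool.and_eq_true, decide_eq_true_eq]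
      omega
  · rintro ⟨part, hp, hsz, hrx, hry⟩
    obtain ⟨snake, hs, hps⟩ := List.mem_flatMap.mp hp
    cases hgx : (PySem.Dict.ofList part).get? "x" with
    | none => rw [hgx] at hrx; exact absurd hrx (by simp [pvInRange])
    | some vx =>
      cases hgy : (PySem.Dict.ofList part).get? "y" with
      | none => rw [hgy] at hry; exact absurd hry (by simp [pvInRange])
      | some vy =>
        rw [hgx] at hrx
        rw [hgy] at hry
        simp only [pvInRange, Bool.and_eq_true, decide_eq_true_eq] at hrx hry
        have hdx : (PySem.Dict.ofList part).getD "x" 0 = vx :=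
          PySem.Dict.getD_of_get?_eq_some _ 0 hgx
        have hdy : (PySem.Dict.ofList part).getD "y" 0 = vy :=
          PySem.Dict.getD_of_get?_eq_some _ 0 hgy
        have hmx : "x" ∈ part.map Prod.fst := by
          rw [← contains_ofList_iff, PySem.Dict.contains_eq_isSome_get?, hgx]; rfl
        have hmy : "y" ∈ part.map Prod.fst := by
          rw [← contains_ofList_iff, PySem.Dict.contains_eq_isSome_get?, hgy]; rfl
        refine ⟨snake, hs, part, hps, hmx, hmy, hsz, ?_, ?_⟩
        · rw [hdx]
          by_cases hc : max ((PySem.Dict.ofList p1).getD "x" 0 - 1) 0 > width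
          · rw [if_pos hc] at hrx; omega
          · rw [if_neg hc] at hrx; omega
        · rw [hdy]
          by_cases hc : max ((PySem.Dict.ofList p1).getD "y" 0 - 1) 0 > height
          · rw [if_pos hc] at hry; omega
          · rw [if_neg hc] at hry; omega

-- A's inner counting loop-- A's inner counting loop
theorem inner_loop (q : List (String × Int) → Bool) (l : List (List (String × Int))) (c : Int) :
    l.foldl (fun c part => if q part then c else c + 1) c =
      c + ((l.filter (fun part => !q part)).length : Int) := by
  induction l generalizing c with
  | nil => simp
  | cons h t ih =>
    simp only [List.foldl_cons, List.filter_cons]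
    cases hq : q h <;> simp [ih] <;> push_cast <;> ring

-- A's outer loop over snakes
theorem outer_loop (q : List (String × Int) → Bool)
    (snakes : List (List (String × List (List (String × Int))))) (a : Int) :
    snakes.foldl
      (fun count snake =>
        ((PySem.Dict.ofList snake).getD "body" []).foldl
          (fun count part => if q part then count else count + 1) count) a =
      a + (((snakes.flatMap (fun snake => (PySem.Dict.ofList snake).getD "body" [])).filter
        (fun part => !q part)).length : Int) := by
  induction snakes generalizing a with
  | nil => simp
  | cons h t ih =>
    simp only [List.foldl_cons, List.flatMap_cons, List.filter_append, List.length_append]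
    rw [inner_loop, ih]
    push_cast; ring

-- pointwise monotone filters have monotone lengths
theorem length_filter_mono {α : Type} (p q : α → Bool) (l : List α)
    (hpq : ∀ x ∈ l, q x = true → p x = true) :
    (l.filter q).length ≤ (l.filter p).length := by
  induction l with
  | nil => simp
  | cons a t ih =>
    have ht := ih (fun x hx => hpq x (List.mem_cons_of_mem a hx))
    simp only [List.filter_cons]
    cases hqa : q a
    · cases hpa : p a <;> simp <;> omega
    · rw [hpq a List.mem_cons_self hqa]
      simpa using ht

-- … and strictly, given one element where they disagree
theorem length_filter_lt {α : Type} (p q : α → Bool) :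
    ∀ (l : List α), (∀ x ∈ l, q x = true → p x = true) →
    ∀ x, x ∈ l → p x = true → q x = false →
    (l.filter q).length < (l.filter p).length
  | [], _, x, hx, _, _ => absurd hx List.not_mem_nil
  | a :: t, hpq, x, hx, hp, hq => by
    have hmt : ∀ y ∈ t, q y = true → p y = true := fun y hy => hpq y (List.mem_cons_of_mem a hy)
    rcases List.mem_cons.mp hx with rfl | hxt
    · rw [List.filter_cons, List.filter_cons, hp, hq]
      simpa using Nat.lt_succ_of_le (length_filter_mono p q t hmt)
    · have ht := length_filter_lt p q t hmt x hxt hp hq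
      rw [List.filter_cons, List.filter_cons]
      cases hqa : q a
      · cases hpa : p a <;> simp <;> omega
      · rw [hpq a List.mem_cons_self hqa]
        simpa using ht

-- ===== VERDICT (by name: the statements are the Claim_ definitions above) =====
theorem num_surrounding_free_spec : Claim_unchanged_num_surrounding_free := by
  intro p1 snakes width height _hDom _hPre hnD
  rw [D_iff] at hnD
  unfold num_surrounding_free num_surrounding_free_alt
  have hmin : ∀ a : Int, (if a - 1 < 0 then 0 else a - 1) = max (a - 1) 0 := by
    intro a; rw [max_def]; split_ifs <;> omega
  simp only [hmin]
  set d := PySem.Dict.ofList p1 with hd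
  set xm := max (d.getD "x" 0 - 1) 0 with hxm
  set ym := max (d.getD "y" 0 - 1) 0 with hym
  set xM := if xm > width then width else d.getD "x" 0 + 1 with hxM
  set yM := if ym > height then height else d.getD "y" 0 + 1 with hyM
  rw [outer_loop (fun part =>
    (pvSurrounding xm xM ym yM).any (fun s => pyDictEq (PySem.Dict.ofList part) s)), zero_add]
  have hpt : ∀ part ∈ snakes.flatMap (fun snake => (PySem.Dict.ofList snake).getD "body" []),
      (!((pvSurrounding xm xM ym yM).any (fun s => pyDictEq (PySem.Dict.ofList part) s))) =
      (!pvInRange ((PySem.Dict.ofList part).get? "x") xm (xM + 1) ||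
       !pvInRange ((PySem.Dict.ofList part).get? "y") ym (yM + 1)) := by
    intro part hp
    rw [any_eq xm xM ym yM part]
    cases hrx : pvInRange ((PySem.Dict.ofList part).get? "x") xm (xM + 1)
    · simp
    · cases hry : pvInRange ((PySem.Dict.ofList part).get? "y") ym (yM + 1)
      · simp
      · by_cases hsz : (PySem.Dict.ofList part).size = 2
        · simp [hsz]
        · exact absurd ⟨part, hp, hsz, hrx, hry⟩ hnD
  congr 1
  exact congrArg List.length (List.filter_congr hpt)

theorem num_surrounding_free_changed : Claim_changed_num_surrounding_free := by
  unfold Claim_changed_num_surrounding_free; decide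

theorem num_surrounding_free_tight : Claim_exact_num_surrounding_free := by
  intro p1 snakes width height _hDom _hPre hD
  obtain ⟨part0, hp0, hsz0, hrx0, hry0⟩ := (D_iff p1 snakes width height).mp hD
  unfold num_surrounding_free num_surrounding_free_alt
  have hmin : ∀ a : Int, (if a - 1 < 0 then 0 else a - 1) = max (a - 1) 0 := by
    intro a; rw [max_def]; split_ifs <;> omega
  simp only [hmin]
  set d := PySem.Dict.ofList p1 with hd
  set xm := max (d.getD "x" 0 - 1) 0 with hxm
  set ym := max (d.getD "y" 0 - 1) 0 with hym
  set xM := if xm > width then width else d.getD "x" 0 + 1 with hxM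
  set yM := if ym > height then height else d.getD "y" 0 + 1 with hyM
  rw [outer_loop (fun part =>
    (pvSurrounding xm xM ym yM).any (fun s => pyDictEq (PySem.Dict.ofList part) s)), zero_add]
  set pa := fun part => !((pvSurrounding xm xM ym yM).any
    (fun s => pyDictEq (PySem.Dict.ofList part) s)) with hpa
  set pb := fun part =>
    (!pvInRange ((PySem.Dict.ofList part).get? "x") xm (xM + 1) ||
     !pvInRange ((PySem.Dict.ofList part).get? "y") ym (yM + 1)) with hpb
  set l := snakes.flatMap (fun snake => (PySem.Dict.ofList snake).getD "body" []) with hl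
  have hmono : ∀ part ∈ l, pb part = true → pa part = true := by
    intro part _hp hqb
    rw [hpa]
    simp only [any_eq xm xM ym yM part]
    rw [hpb] at hqb
    simp only [Bool.or_eq_true, Bool.not_eq_eq_eq_not, Bool.not_true] at hqb
    rcases hqb with h | h <;> simp [h]
  have hpa0 : pa part0 = true := by
    rw [hpa]
    simp only [any_eq xm xM ym yM part0]
    have h2 : ((PySem.Dict.ofList part0).size == 2) = false := by simpa using hsz0
    simp [h2]
  have hpb0 : pb part0 = false := by
    simp only [hpb, hrx0, hry0]
    rfl
  have hlt := length_filter_lt pa pb l hmono part0 hp0 hpa0 hpb0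
  intro hEq
  have : ((l.filter pa).length : Int) = ((l.filter pb).length : Int) := hEq
  omega
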